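-- pv_equiv track=rewrite | github.com/hassanmzia/Inhealth-Capstone-Project | agents/research_system/synthesis_agent.py | _cluster_by_topic
-- ===== SOURCE A (Python) =====
-- from typing import Any, Dict, List, Optional
--
-- def _cluster_by_topic(
--     results: List[Dict[str, Any]]
-- ) -> Dict[str, List[str]]:
--     """Simple keyword-based topic clustering."""
--     clusters: Dict[str, List[str]] = {
--         "treatment": [],
--         "prevention": [],
--         "diagnosis": [],
--         "prognosis": [],
--         "mechanism": [],
--         "other": [],
--     }
--     keywords = {
--         "treatment": ["treatment", "therapy", "intervention", "medication", "drug"],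
--         "prevention": ["prevention", "screening", "risk reduction", "prophylaxis"],
--         "diagnosis": ["diagnosis", "diagnostic", "biomarker", "sensitivity", "specificity"],
--         "prognosis": ["prognosis", "outcome", "survival", "mortality", "risk factor"],
--         "mechanism": ["mechanism", "pathophysiology", "molecular", "pathway"],
--     }
--     for r in results:
--         title_lower = r.get("title", "").lower()
--         assigned = False
--         for cluster, kws in keywords.items():
--             if any(kw in title_lower for kw in kws):
--                 clusters[cluster].append(r.get("title", "")[:80])
--                 assigned = True
--                 break
--         if not assigned:
--             clusters["other"].append(r.get("title", "")[:80])
--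
--     return {k: v for k, v in clusters.items() if v}
-- ===== SOURCE B (Python) =====
-- from typing import Any, Dict, List
--
--
-- def _cluster_by_topic(
--     results: List[Dict[str, Any]]
-- ) -> Dict[str, List[str]]:
--     """Keyword-based topic clustering, built cluster-by-cluster."""
--     keywords = {
--         "treatment": ["treatment", "therapy", "intervention", "medication", "drug"],
--         "prevention": ["prevention", "screening", "risk reduction", "prophylaxis"],
--         "diagnosis": ["diagnosis", "diagnostic", "biomarker", "sensitivity", "specificity"],
--         "prognosis": ["prognosis", "outcome", "survival", "mortality", "risk factor"],
--         "mechanism": ["mechanism", "pathophysiology", "molecular", "pathway"],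
--     }
--
--     def bucket_of(r: Dict[str, Any]) -> str:
--         tl = r.get("title", "").lower()
--         for name, kws in keywords.items():
--             if any(kw in tl for kw in kws):
--                 return name
--         return "other"
--
--     out: Dict[str, List[str]] = {}
--     for name in list(keywords) + ["other"]:
--         titles = [r.get("title", "")[:80] for r in results if bucket_of(r) == name]
--         if titles:
--             out[name] = titles
--     return out
-- ===== Notes on version B (the rewrite author's own statement) =====
-- stated objective: alternative
-- what changed: B transposes the loops: instead of A's single pass over results that appends each title into a pre-seeded clusters dict (with break) and filters empty buckets at the end, B builds each cluster in key order as one filtered pass over results using a first-matching-cluster classifier, emitting only non-empty buckets directly.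
import Mathlib
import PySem

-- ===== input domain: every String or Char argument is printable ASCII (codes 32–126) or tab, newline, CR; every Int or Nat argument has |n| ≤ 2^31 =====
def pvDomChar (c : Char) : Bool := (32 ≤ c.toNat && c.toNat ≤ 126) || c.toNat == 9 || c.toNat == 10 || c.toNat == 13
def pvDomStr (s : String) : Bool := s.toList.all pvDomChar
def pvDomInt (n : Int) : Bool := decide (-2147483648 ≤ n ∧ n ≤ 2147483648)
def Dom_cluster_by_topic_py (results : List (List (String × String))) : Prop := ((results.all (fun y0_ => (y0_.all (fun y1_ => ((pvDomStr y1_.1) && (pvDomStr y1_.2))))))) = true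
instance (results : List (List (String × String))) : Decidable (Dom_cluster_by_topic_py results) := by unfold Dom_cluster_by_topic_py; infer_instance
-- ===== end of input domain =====

-- B rebuilds the clustering cluster-by-cluster (one filtered pass per cluster via a
-- first-matching-cluster classifier) instead of A's single pass that appends into a
-- pre-seeded dict and filters it at the end; objective: alternative decomposition.

-- the keyword table (the same literal in both Pythons)
def pvKeywords : List (String × List String) :=
  [("treatment", ["treatment", "therapy", "intervention", "medication", "drug"]),
   ("prevention", ["prevention", "screening", "risk reduction", "prophylaxis"]),
   ("diagnosis", ["diagnosis", "diagnostic", "biomarker", "sensitivity", "specificity"]),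
   ("prognosis", ["prognosis", "outcome", "survival", "mortality", "risk factor"]),
   ("mechanism", ["mechanism", "pathophysiology", "molecular", "pathway"])]

-- r.get("title", ""): first match in the association list, default ""
def pvGetTitle (r : List (String × String)) : String :=
  match r.find? (fun kv => kv.1 == "title") with
  | some kv => kv.2
  | none => ""

-- ===== PORT A =====
-- the pre-seeded clusters dict
def pvClustersInit : PySem.Dict String (List String) :=
  ⟨[("treatment", []), ("prevention", []), ("diagnosis", []), ("prognosis", []),
    ("mechanism", []), ("other", [])]⟩

-- A's inner 'for cluster, kws in keywords.items(): if any(...): append; break'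
-- returns the updated dict and the 'assigned' flag
def pvAssignLoop (tl t80 : String) (kwl : List (String × List String))
    (d : PySem.Dict String (List String)) : PySem.Dict String (List String) × Bool :=
  match kwl with
  | [] => (d, false)
  | (c, kws) :: rest =>
    if kws.any (fun kw => PySem.Str.isIn kw tl) then
      (d.modify c [] (fun v => v ++ [t80]), true)
    else pvAssignLoop tl t80 rest d

def cluster_by_topic_py (results : List (List (String × String))) : List (String × List String) :=
  (results.foldl (fun d r =>
      let tl := PySem.Str.lower (pvGetTitle r)
      let p := pvAssignLoop tl (PySem.Str.slice (pvGetTitle r) none (some 80)) pvKeywords d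
      if p.2 then p.1
      else p.1.modify "other" [] (fun v => v ++ [PySem.Str.slice (pvGetTitle r) none (some 80)]))
    pvClustersInit).items.filter (fun kv => !kv.2.isEmpty)

-- ===== PORT B =====
-- B's bucket_of: the first cluster name whose keyword list matches, else "other"
def pvFirstName (kwl : List (String × List String)) (tl : String) : String :=
  match kwl with
  | [] => "other"
  | (c, kws) :: rest =>
    if kws.any (fun kw => PySem.Str.isIn kw tl) then c else pvFirstName rest tl

def pvBucketOf (r : List (String × String)) : String :=
  pvFirstName pvKeywords (PySem.Str.lower (pvGetTitle r))

def cluster_by_topic_py_alt (results : List (List (String × String))) : List (String × List String) :=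
  (pvKeywords.map (fun kv => kv.1) ++ ["other"]).foldl (fun out name =>
      let titles := (results.filter (fun r => pvBucketOf r == name)).map
        (fun r => PySem.Str.slice (pvGetTitle r) none (some 80))
      if titles.isEmpty then out else out ++ [(name, titles)]) []

-- ===== PRECONDITION & SPEC =====
def Spec_cluster_by_topic_py (results : List (List (String × String))) (out : List (String × List String)) : Prop := out = cluster_by_topic_py_alt results
instance (results : List (List (String × String))) (out : List (String × List String)) : Decidable (Spec_cluster_by_topic_py results out) := by unfold Spec_cluster_by_topic_py; infer_instance

-- ===== CLAIM (what is proved, stated in full; the proofs are below) =====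
def Claim_equal_cluster_by_topic_py : Prop := ∀ (results : List (List (String × String))), Dom_cluster_by_topic_py results → Spec_cluster_by_topic_py results (cluster_by_topic_py results)

-- ===== LEMMAS AND PROOFS =====

-- shorthand used only by the proofs
def pvT80 (r : List (String × String)) : String := PySem.Str.slice (pvGetTitle r) none (some 80)
def pvKeys6 : List String := ["treatment", "prevention", "diagnosis", "prognosis", "mechanism", "other"]
def pvTitles (results : List (List (String × String))) (name : String) : List String :=
  (results.filter (fun r => pvBucketOf r == name)).map pvT80

-- A's per-result body is one append at the result's first-matching bucket
lemma pvStepA (d : PySem.Dict String (List String)) (r : List (String × String)) :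
    (let tl := PySem.Str.lower (pvGetTitle r)
     let p := pvAssignLoop tl (PySem.Str.slice (pvGetTitle r) none (some 80)) pvKeywords d
     if p.2 then p.1
     else p.1.modify "other" [] (fun v => v ++ [PySem.Str.slice (pvGetTitle r) none (some 80)]))
    = d.modify (pvBucketOf r) [] (fun v => v ++ [pvT80 r]) := by
  simp only [pvAssignLoop, pvBucketOf, pvFirstName, pvKeywords, pvT80]
  split_ifs <;> simp_all

lemma pvBucket_mem (r : List (String × String)) : pvBucketOf r ∈ pvKeys6 := by
  simp only [pvBucketOf, pvFirstName, pvKeywords, pvKeys6]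
  split_ifs <;> simp

lemma pvUpdate_of_mem {s : PySem.Set String} : ∀ (l : List String), (∀ x ∈ l, x ∈ s) → PySem.Set.update s l = s
  | [], _ => rfl
  | x :: l, h => by
    have hx : s.add x = s := PySem.Set.add_of_mem (h x (by simp))
    simp only [PySem.Set.update, List.foldl_cons, hx]
    exact pvUpdate_of_mem l (fun y hy => h y (by simp [hy]))

lemma pvFinal_getD (results : List (List (String × String))) (c : String)
    (hc : pvClustersInit.getD c [] = []) :
    (results.foldl (fun d r => d.modify (pvBucketOf r) [] (fun v => v ++ [pvT80 r])) pvClustersInit).getD c []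
      = pvTitles results c := by
  have h := PySem.Dict.getD_foldl_modify_append
      (results.map (fun r => (pvBucketOf r, pvT80 r))) pvClustersInit c
  rw [List.foldl_map] at h
  simpa [pvTitles, hc, List.filter_map, Function.comp] using h

lemma pvFinal_keys (results : List (List (String × String))) :
    (results.foldl (fun d r => d.modify (pvBucketOf r) [] (fun v => v ++ [pvT80 r])) pvClustersInit).keys
      = pvKeys6 := by
  have h := PySem.Dict.keys_foldl_modify_key results pvBucketOf ([] : List String)
      (fun _ r v => v ++ [pvT80 r]) pvClustersInit
  rw [h]
  have hk : pvClustersInit.keys = pvKeys6 := rfl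
  rw [hk]
  exact pvUpdate_of_mem _ (by intro x hx; rcases List.mem_map.1 hx with ⟨r, _, rfl⟩; exact pvBucket_mem r)

lemma pvA_eq (results : List (List (String × String))) :
    cluster_by_topic_py results
      = (pvKeys6.map (fun k => (k, pvTitles results k))).filter (fun kv => !kv.2.isEmpty) := by
  unfold cluster_by_topic_py
  have hf : (fun (d : PySem.Dict String (List String)) (r : List (String × String)) =>
      (let tl := PySem.Str.lower (pvGetTitle r)
       let p := pvAssignLoop tl (PySem.Str.slice (pvGetTitle r) none (some 80)) pvKeywords d
       if p.2 then p.1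
       else p.1.modify "other" [] (fun v => v ++ [PySem.Str.slice (pvGetTitle r) none (some 80)])))
      = fun d r => d.modify (pvBucketOf r) [] (fun v => v ++ [pvT80 r]) := by
    funext d r; exact pvStepA d r
  rw [hf]
  have hkeys := pvFinal_keys results
  have hnd : (results.foldl (fun d r => d.modify (pvBucketOf r) [] (fun v => v ++ [pvT80 r])) pvClustersInit).keys.Nodup := by
    rw [hkeys]; decide
  rw [PySem.Dict.items_eq_map_keys _ hnd ([] : List String), hkeys]
  congr 1
  apply List.map_congr_left
  intro k hk
  have hc : pvClustersInit.getD k [] = [] := by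
    fin_cases hk <;> rfl
  rw [pvFinal_getD results k hc]

lemma pvB_eq (results : List (List (String × String))) :
    cluster_by_topic_py_alt results
      = (pvKeys6.filter (fun k => !(pvTitles results k).isEmpty)).map (fun k => (k, pvTitles results k)) := by
  unfold cluster_by_topic_py_alt
  have hnames : pvKeywords.map (fun kv => kv.1) ++ ["other"] = pvKeys6 := rfl
  rw [hnames]
  have hf : (fun (out : List (String × List String)) (name : String) =>
      (let titles := (results.filter (fun r => pvBucketOf r == name)).map
          (fun r => PySem.Str.slice (pvGetTitle r) none (some 80))
       if titles.isEmpty then out else out ++ [(name, titles)]))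
      = fun out name => if (!(pvTitles results name).isEmpty) then out ++ [(name, pvTitles results name)] else out := by
    funext out name
    show (if (pvTitles results name).isEmpty then out else out ++ [(name, pvTitles results name)]) = _
    cases h : (pvTitles results name).isEmpty <;> simp_all
  rw [hf, PySem.List.foldl_append_if]
  simp

-- ===== VERDICT (by name: the statement is the Claim_ definition above) =====
theorem cluster_by_topic_py_spec : Claim_equal_cluster_by_topic_py := by
  intro results _
  unfold Spec_cluster_by_topic_py
  rw [pvA_eq, pvB_eq, List.filter_map]
  rfl
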